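-- pv_equiv track=rewrite | github.com/Econotool/Econotool | replication/do_parser.py | _preprocess_do
-- ===== SOURCE A (Python) =====
-- def _preprocess_do(text: str) -> list[tuple[int, str]]:
--     """Preprocess .do file text into clean command lines with line numbers.
--
--     Handles:
--     - Line continuation (/// and /*...*/)
--     - Comments (* at line start, // inline, /* block */)
--     - Multiple commands on one line (separated by \\n but not ;)
--     """
--     lines = text.splitlines()
--     result: list[tuple[int, str]] = []
--
--     # First pass: remove block comments
--     in_block = False
--     cleaned: list[tuple[int, str]] = []
--     for i, line in enumerate(lines, 1):
--         if in_block: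
--             end = line.find("*/")
--             if end >= 0:
--                 line = line[end + 2:]
--                 in_block = False
--             else:
--                 continue
--
--         # Remove block comments that start and end on same line
--         while "/*" in line:
--             start = line.find("/*")
--             end = line.find("*/", start + 2)
--             if end >= 0:
--                 line = line[:start] + " " + line[end + 2:]
--             else:
--                 line = line[:start]
--                 in_block = True
--                 break
--
--         cleaned.append((i, line))
--
--     # Second pass: handle line continuations (///)
--     merged: list[tuple[int, str]] = []
--     accumulator = ""
--     start_line = 0
--     for lineno, line in cleaned:
--         stripped = line.strip()
--
--         # Skip pure comment lines
--         if stripped.startswith("*"):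
--             continue
--
--         # Remove inline // comments (but not ///)
--         comment_pos = _find_inline_comment(stripped)
--         if comment_pos >= 0:
--             stripped = stripped[:comment_pos].rstrip()
--
--         # Handle continuation
--         if stripped.endswith("///"):
--             if not accumulator:
--                 start_line = lineno
--             accumulator += stripped[:-3] + " "
--             continue
--
--         if accumulator:
--             accumulator += stripped
--             merged.append((start_line, accumulator.strip()))
--             accumulator = ""
--         elif stripped:
--             merged.append((lineno, stripped))
--
--     if accumulator:
--         merged.append((start_line, accumulator.strip()))
--
--     return merged
--
-- def _find_inline_comment(line: str) -> int:
--     """Find position of // comment (not /// continuation)."""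
--     i = 0
--     in_quote = False
--     while i < len(line) - 1:
--         if line[i] == '"':
--             in_quote = not in_quote
--         elif not in_quote and line[i:i+2] == "//":
--             # Check that this // is not part of a /// continuation
--             if line[i:i+3] == "///":
--                 i += 3  # skip past the ///
--                 continue
--             return i
--         i += 1
--     return -1
-- ===== SOURCE B (Python) =====
-- def _preprocess_do(text: str) -> list[tuple[int, str]]:
--     """Single streaming pass: char-level block-comment scanner fused with
--     comment-stripping / continuation merging."""
--     merged: list[tuple[int, str]] = []
--     in_block = False
--     accumulator = ""
--     start_line = 0
--     for lineno, raw in enumerate(text.splitlines(), 1):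
--         # character-level removal of /* ... */ block comments
--         buf: list[str] = []
--         opened_here = False
--         i = 0
--         n = len(raw)
--         while i < n:
--             if in_block:
--                 if raw[i:i + 2] == "*/":
--                     in_block = False
--                     if opened_here:
--                         buf.append(" ")
--                     i += 2
--                 else:
--                     i += 1
--             elif raw[i:i + 2] == "/*":
--                 in_block = True
--                 opened_here = True
--                 i += 2
--             else:
--                 buf.append(raw[i])
--                 i += 1
--         if in_block and not opened_here:
--             continue  # whole line sits inside a block comment from before
--         stripped = "".join(buf).strip()
--
--         if stripped.startswith("*"):
--             continue
--
--         comment_pos = _find_inline_comment(stripped)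
--         if comment_pos >= 0:
--             stripped = stripped[:comment_pos].rstrip()
--
--         if stripped.endswith("///"):
--             if not accumulator:
--                 start_line = lineno
--             accumulator += stripped[:-3] + " "
--             continue
--
--         if accumulator:
--             accumulator += stripped
--             merged.append((start_line, accumulator.strip()))
--             accumulator = ""
--         elif stripped:
--             merged.append((lineno, stripped))
--
--     if accumulator:
--         merged.append((start_line, accumulator.strip()))
--
--     return merged
--
--
-- def _find_inline_comment(line: str) -> int:
--     """Find position of // comment (not /// continuation)."""
--     i = 0
--     in_quote = False
--     while i < len(line) - 1:
--         if line[i] == '"':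
--             in_quote = not in_quote
--         elif not in_quote and line[i:i+2] == "//":
--             if line[i:i+3] == "///":
--                 i += 3
--                 continue
--             return i
--         i += 1
--     return -1
-- ===== Notes on version B (the rewrite author's own statement) =====
-- stated objective: alternative
-- what changed: A's two list-building passes (find/slice block-comment removal producing an intermediate cleaned list, then a continuation-merging pass) are fused into one streaming loop whose block comments are removed by a character-level state-machine scan instead of repeated find/slice rescans.
import Mathlib
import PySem

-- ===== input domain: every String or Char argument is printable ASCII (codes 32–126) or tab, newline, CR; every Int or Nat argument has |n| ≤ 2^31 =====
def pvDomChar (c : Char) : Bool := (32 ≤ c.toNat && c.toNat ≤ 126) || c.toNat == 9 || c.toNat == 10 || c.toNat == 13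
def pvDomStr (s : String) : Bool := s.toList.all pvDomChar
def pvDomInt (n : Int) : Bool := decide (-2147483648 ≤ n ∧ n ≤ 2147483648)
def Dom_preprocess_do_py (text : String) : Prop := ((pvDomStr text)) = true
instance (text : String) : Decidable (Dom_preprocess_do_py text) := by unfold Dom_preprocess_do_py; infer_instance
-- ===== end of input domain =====

-- B fuses A's two passes into one streaming loop and removes /*..*/ block comments by a
-- character-level scan instead of repeated find/slice rescans; equal return value proved on Dom.


-- ===== PORT A =====

-- shared helper `_find_inline_comment` (identical in Source A and Source B): while i < len(cs)-1 …
def pvFindInlineAux (cs : List Char) (i : Nat) (in_quote : Bool) : Int :=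
  if h : i + 1 < cs.length then
    if cs[i]'(by omega) = '"' then
      pvFindInlineAux cs (i + 1) (!in_quote)
    else if !in_quote && (PySem.List.slice cs (some (i : Int)) (some ((i : Int) + 2)) == ['/', '/']) then
      if PySem.List.slice cs (some (i : Int)) (some ((i : Int) + 3)) == ['/', '/', '/'] then
        pvFindInlineAux cs (i + 3) in_quote   -- skip past the ///
      else
        (i : Int)
    else
      pvFindInlineAux cs (i + 1) in_quote
  else
    -1
termination_by cs.length - i

def pvFindInline (cs : List Char) : Int := pvFindInlineAux cs 0 false

-- the `while "/*" in cs` loop of A's first pass; each iteration shortens the cs by ≥ 3,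
-- so fuel = cs.length + 1 is never exhausted (the fuel-0 value is unreachable)
def pvBlockLoopA : Nat → List Char → List Char × Bool
  | 0, cs => (cs, false)
  | fuel + 1, cs =>
    if PySem.Chars.isIn ['/', '*'] cs then
      let s := PySem.Chars.find cs ['/', '*']
      let e := PySem.Chars.findFrom cs ['*', '/'] (s + 2)
      if 0 ≤ e then
        pvBlockLoopA fuel
          (PySem.Chars.slice cs none (some s) ++ [' '] ++ PySem.Chars.slice cs (some (e + 2)) none)
      else
        (PySem.Chars.slice cs none (some s), true)
    else
      (cs, false)

-- one iteration of A's first `for i, cs in enumerate(lines, 1)` loop; state (i, in_block, cleaned)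
def pvPhase1Step (st : Int × Bool × List (Int × List Char)) (cs : List Char) :
    Int × Bool × List (Int × List Char) :=
  let (i, in_block, cleaned) := st
  if in_block then
    let e := PySem.Chars.find cs ['*', '/']
    if 0 ≤ e then
      let line2 := PySem.Chars.slice cs (some (e + 2)) none
      let r := pvBlockLoopA (line2.length + 1) line2
      (i + 1, r.2, cleaned ++ [(i, r.1)])
    else
      (i + 1, true, cleaned)   -- continue
  else
    let r := pvBlockLoopA (cs.length + 1) cs
    (i + 1, r.2, cleaned ++ [(i, r.1)])

-- one iteration of A's second loop; state (merged, accumulator, start_line)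
def pvPhase2Step (st : List (Int × List Char) × List Char × Int) (p : Int × List Char) :
    List (Int × List Char) × List Char × Int :=
  let (merged, acc, sl) := st
  let stripped := PySem.Chars.strip p.2
  if PySem.Chars.startswith stripped ['*'] then
    (merged, acc, sl)   -- skip pure comment lines
  else
    let cp := pvFindInline stripped
    let stripped2 :=
      if 0 ≤ cp then PySem.Chars.rstrip (PySem.Chars.slice stripped none (some cp)) else stripped
    if PySem.Chars.endswith stripped2 ['/', '/', '/'] then
      let sl2 := if acc.isEmpty then p.1 else sl
      (merged, acc ++ PySem.Chars.slice stripped2 none (some (-3)) ++ [' '], sl2)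
    else if !acc.isEmpty then
      (merged ++ [(sl, PySem.Chars.strip (acc ++ stripped2))], [], sl)
    else if !stripped2.isEmpty then
      (merged ++ [(p.1, stripped2)], acc, sl)
    else
      (merged, acc, sl)

def preprocess_do_py (text : String) : List (Int × String) :=
  let lines := PySem.Chars.splitlines text.toList
  let c := lines.foldl pvPhase1Step (1, false, [])
  let m := c.2.2.foldl pvPhase2Step ([], [], 0)
  let merged := if !m.2.1.isEmpty then m.1 ++ [(m.2.2, PySem.Chars.strip m.2.1)] else m.1
  merged.map (fun q => (q.1, String.ofList q.2))

-- ===== PORT B =====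

-- B's character-level block-comment scanner: one recursive call per loop iteration;
-- `raw[i:i+2] == "*/"` is `c = '*' ∧ rest.head? = some '/'` (and i += 2 is rest.tail)
def pvScanB : List Char → Bool → Bool → List Char × Bool × Bool
  | [], in_block, opened_here => ([], in_block, opened_here)
  | c :: rest, in_block, opened_here =>
    if in_block then
      if c = '*' ∧ rest.head? = some '/' then
        let r := pvScanB rest.tail false opened_here
        ((if opened_here then [' '] else []) ++ r.1, r.2)
      else
        pvScanB rest true opened_here
    else
      if c = '/' ∧ rest.head? = some '*' then
        pvScanB rest.tail true true
      else
        let r := pvScanB rest false opened_here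
        (c :: r.1, r.2)
termination_by cs _ _ => cs.length
decreasing_by all_goals (simp [List.length_tail]; try omega)

-- one iteration of B's single fused loop; state (lineno, in_block, accumulator, start_line, merged)
def pvStepB (st : Int × Bool × List Char × Int × List (Int × List Char)) (raw : List Char) :
    Int × Bool × List Char × Int × List (Int × List Char) :=
  let (lineno, in_block, acc, sl, merged) := st
  let (buf, inb2, oh) := pvScanB raw in_block false
  if inb2 && !oh then
    (lineno + 1, inb2, acc, sl, merged)   -- whole cs sits inside a block comment from before
  else
    let stripped := PySem.Chars.strip buf
    if PySem.Chars.startswith stripped ['*'] then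
      (lineno + 1, inb2, acc, sl, merged)
    else
      let cp := pvFindInline stripped
      let stripped2 :=
        if 0 ≤ cp then PySem.Chars.rstrip (PySem.Chars.slice stripped none (some cp)) else stripped
      if PySem.Chars.endswith stripped2 ['/', '/', '/'] then
        let sl2 := if acc.isEmpty then lineno else sl
        (lineno + 1, inb2, acc ++ PySem.Chars.slice stripped2 none (some (-3)) ++ [' '], sl2, merged)
      else if !acc.isEmpty then
        (lineno + 1, inb2, [], sl, merged ++ [(sl, PySem.Chars.strip (acc ++ stripped2))])
      else if !stripped2.isEmpty then
        (lineno + 1, inb2, acc, sl, merged ++ [(lineno, stripped2)])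
      else
        (lineno + 1, inb2, acc, sl, merged)

def preprocess_do_py_alt (text : String) : List (Int × String) :=
  let q := (PySem.Chars.splitlines text.toList).foldl pvStepB (1, false, [], 0, [])
  let merged := if !q.2.2.1.isEmpty then q.2.2.2.2 ++ [(q.2.2.2.1, PySem.Chars.strip q.2.2.1)] else q.2.2.2.2
  merged.map (fun p => (p.1, String.ofList p.2))

-- ===== PRECONDITION & SPEC =====
def Spec_preprocess_do_py (text : String) (out : List (Int × String)) : Prop := out = preprocess_do_py_alt text
instance (text : String) (out : List (Int × String)) : Decidable (Spec_preprocess_do_py text out) := by unfold Spec_preprocess_do_py; infer_instance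

-- ===== CLAIM (what is proved, stated in full; the proofs are below) =====
def Claim_equal_preprocess_do_py : Prop := ∀ (text : String), Dom_preprocess_do_py text → Spec_preprocess_do_py text (preprocess_do_py text)

-- ===== LEMMAS AND PROOFS =====

lemma pvScanB_nil (b oh : Bool) : pvScanB [] b oh = ([], b, oh) := by simp [pvScanB]

lemma pvScanB_cons (c : Char) (rest : List Char) (b oh : Bool) :
    pvScanB (c :: rest) b oh =
      if b then
        if c = '*' ∧ rest.head? = some '/' then
          ((if oh then [' '] else []) ++ (pvScanB rest.tail false oh).1, (pvScanB rest.tail false oh).2)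
        else pvScanB rest true oh
      else
        if c = '/' ∧ rest.head? = some '*' then pvScanB rest.tail true true
        else (c :: (pvScanB rest false oh).1, (pvScanB rest false oh).2) := by
  rw [pvScanB]


lemma pvScanB_oh_true' : ∀ (n : Nat) (cs : List Char) (b : Bool), cs.length ≤ n →
    (pvScanB cs b true).2.2 = true := by
  intro n
  induction n with
  | zero => intro cs b h; rw [List.length_eq_zero_iff.mp (Nat.le_zero.mp h)]; simp [pvScanB_nil]
  | succ n ih =>
    intro cs b h
    match cs with
    | [] => simp [pvScanB_nil]
    | c :: rest =>
      rw [pvScanB_cons]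
      simp only [List.length_cons] at h
      split <;> split <;>
        first
          | exact ih _ _ (by simp [List.length_tail]; omega)
          | exact ih _ _ (by omega)

lemma pvScanB_false_opened : ∀ (cs : List Char) (oh : Bool),
    (pvScanB cs false oh).2.1 = true → (pvScanB cs false oh).2.2 = true := by
  intro cs
  induction cs with
  | nil => intro oh h; simp [pvScanB_nil] at h
  | cons c rest ih =>
    intro oh
    rw [pvScanB_cons]
    simp only [Bool.false_eq_true, if_false]
    split
    · intro _; exact pvScanB_oh_true' rest.tail.length _ _ le_rfl
    · exact ih oh

lemma pvScanB_false_oh : ∀ (cs : List Char) (oh oh' : Bool),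
    (pvScanB cs false oh).1 = (pvScanB cs false oh').1 ∧
    (pvScanB cs false oh).2.1 = (pvScanB cs false oh').2.1 := by
  intro cs
  induction cs with
  | nil => intro oh oh'; simp [pvScanB_nil]
  | cons c rest ih =>
    intro oh oh'
    rw [pvScanB_cons, pvScanB_cons]
    simp only [Bool.false_eq_true, if_false]
    split
    · exact ⟨rfl, rfl⟩
    · exact ⟨by simp [(ih oh oh').1], (ih oh oh').2⟩

lemma pvScanB_true_noclose : ∀ (cs : List Char) (oh : Bool),
    (∀ i, ¬(cs[i]? = some '*' ∧ cs[i+1]? = some '/')) →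
    pvScanB cs true oh = ([], true, oh) := by
  intro cs
  induction cs with
  | nil => intro oh _; simp [pvScanB_nil]
  | cons c rest ih =>
    intro oh H
    rw [pvScanB_cons]
    simp only [if_true]
    split
    · rename_i hc
      exact absurd ⟨by simp [hc.1], by simpa [List.head?_eq_getElem?] using hc.2⟩ (H 0)
    · exact ih oh (fun i => by simpa using H (i+1))

lemma pvScanB_true_close : ∀ (u v : List Char) (oh : Bool),
    (∀ i, i < u.length → ¬((u ++ '*' :: '/' :: v)[i]? = some '*' ∧ (u ++ '*' :: '/' :: v)[i+1]? = some '/')) →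
    pvScanB (u ++ '*' :: '/' :: v) true oh =
      ((if oh then [' '] else []) ++ (pvScanB v false oh).1, (pvScanB v false oh).2) := by
  intro u
  induction u with
  | nil =>
    intro v oh _
    rw [List.nil_append, pvScanB_cons]
    simp
  | cons c u' ih =>
    intro v oh H
    rw [List.cons_append, pvScanB_cons]
    simp only [if_true]
    split
    · rename_i hc
      exact absurd ⟨by simp [hc.1], by simpa [List.head?_eq_getElem?] using hc.2⟩ (H 0 (by simp))
    · exact ih v oh (fun i hi => by simpa using H (i+1) (by simpa using hi))

lemma pvScanB_false_copy : ∀ (u v : List Char) (oh : Bool),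
    (∀ i, i < u.length → ¬((u ++ v)[i]? = some '/' ∧ (u ++ v)[i+1]? = some '*')) →
    pvScanB (u ++ v) false oh = (u ++ (pvScanB v false oh).1, (pvScanB v false oh).2) := by
  intro u
  induction u with
  | nil => intro v oh _; simp
  | cons c u' ih =>
    intro v oh H
    rw [List.cons_append, pvScanB_cons]
    simp only [Bool.false_eq_true, if_false]
    split
    · rename_i hc
      exact absurd ⟨by simp [hc.1], by simpa [List.head?_eq_getElem?] using hc.2⟩ (H 0 (by simp))
    · rw [ih v oh (fun i hi => by simpa using H (i+1) (by simpa using hi))]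
      simp

lemma pvScanB_false_nopen (cs : List Char) (oh : Bool)
    (H : ∀ i, ¬(cs[i]? = some '/' ∧ cs[i+1]? = some '*')) :
    pvScanB cs false oh = (cs, false, oh) := by
  have := pvScanB_false_copy cs [] oh (fun i hi => by simpa using H i)
  simpa [pvScanB_nil] using this

lemma pvPairAt (a b : Char) (t : List Char) (i : Nat) :
    [a, b] <+: t.drop i ↔ t[i]? = some a ∧ t[i+1]? = some b := by
  constructor
  · rintro ⟨s, hs⟩
    have h0 : (t.drop i)[0]? = some a := by rw [← hs]; rfl
    have h1 : (t.drop i)[1]? = some b := by rw [← hs]; rfl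
    rw [List.getElem?_drop] at h0 h1
    exact ⟨by simpa using h0, by simpa using h1⟩
  · rintro ⟨h1, h2⟩
    have hk : i < t.length := (List.getElem?_eq_some_iff.mp h1).1
    have hk1 : i + 1 < t.length := (List.getElem?_eq_some_iff.mp h2).1
    rw [List.drop_eq_getElem_cons hk, List.drop_eq_getElem_cons hk1]
    have e1 : t[i] = a := by
      obtain ⟨_, h⟩ := List.getElem?_eq_some_iff.mp h1; exact h
    have e2 : t[i+1] = b := by
      obtain ⟨_, h⟩ := List.getElem?_eq_some_iff.mp h2; exact h
    rw [e1, e2]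
    exact ⟨_, rfl⟩

lemma pvSplitPair (cs : List Char) (k : Nat) (a b : Char)
    (h1 : cs[k]? = some a) (h2 : cs[k+1]? = some b) :
    cs = cs.take k ++ a :: b :: cs.drop (k + 2) := by
  have hk : k < cs.length := (List.getElem?_eq_some_iff.mp h1).1
  have hk1 : k + 1 < cs.length := (List.getElem?_eq_some_iff.mp h2).1
  conv_lhs => rw [← List.take_append_drop k cs]
  rw [List.drop_eq_getElem_cons hk, List.drop_eq_getElem_cons hk1]
  obtain ⟨_, e1⟩ := List.getElem?_eq_some_iff.mp h1
  obtain ⟨_, e2⟩ := List.getElem?_eq_some_iff.mp h2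
  rw [e1, e2]

-- `/* …` opens a block: one scan step
lemma pvScanB_open (w : List Char) (oh : Bool) :
    pvScanB ('/' :: '*' :: w) false oh = pvScanB w true true := by
  rw [pvScanB_cons]; simp

-- ¬infix gives the per-position form used by the scan lemmas
lemma pvNoInfix (a b : Char) (t : List Char) (h : ¬ [a, b] <:+: t) :
    ∀ i, ¬(t[i]? = some a ∧ t[i+1]? = some b) := by
  intro i hi
  exact h ((((pvPairAt a b t i).mpr hi).isInfix).trans (List.drop_suffix i t).isInfix)


lemma pvBlockLoopA_eq_scan : ∀ (n : Nat) (cs : List Char), cs.length < n →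
    pvBlockLoopA n cs = ((pvScanB cs false false).1, (pvScanB cs false false).2.1) := by
  intro n
  induction n with
  | zero => intro cs h; omega
  | succ n ih =>
    intro cs hlen
    rw [pvBlockLoopA]
    by_cases hin : PySem.Chars.isIn ['/', '*'] cs = true
    · simp only [hin, if_true]
      have hk0 : 0 ≤ PySem.Chars.find cs ['/', '*'] :=
        (PySem.Chars.find_nonneg_iff _ _).mpr ((PySem.Chars.isIn_iff_infix _ _).mp hin)
      obtain ⟨hpre, hmin⟩ := PySem.Chars.find_spec hk0
      set K := (PySem.Chars.find cs ['/', '*']).toNat with hK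
      have hkK : PySem.Chars.find cs ['/', '*'] = (K : Int) := (Int.toNat_of_nonneg hk0).symm
      have hKpair : cs[K]? = some '/' ∧ cs[K+1]? = some '*' := (pvPairAt _ _ _ _).mp hpre
      have hKlen : K + 1 < cs.length := (List.getElem?_eq_some_iff.mp hKpair.2).1
      have hKlen2 : K + 2 ≤ cs.length := by omega
      have hcast : PySem.Chars.find cs ['/', '*'] + 2 = ((K + 2 : Nat) : Int) := by
        rw [hkK]; push_cast; ring
      -- decompose cs at the first "/*"
      have hsplit : cs = cs.take K ++ '/' :: '*' :: cs.drop (K + 2) := pvSplitPair _ _ _ _ hKpair.1 hKpair.2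
      have hscan : pvScanB cs false false
          = (cs.take K ++ (pvScanB (cs.drop (K+2)) true true).1, (pvScanB (cs.drop (K+2)) true true).2) := by
        conv_lhs => rw [hsplit]
        rw [pvScanB_false_copy _ _ _ ?hcopy]
        · rw [pvScanB_open]
        case hcopy =>
          intro i hi hpair
          rw [← hsplit] at hpair
          have hilen : i < K := by
            have := List.length_take_le K cs
            calc i < (cs.take K).length := hi
              _ ≤ K := by simpa using List.length_take_le K cs
          exact (pvPairAt '/' '*' cs i).mp ((pvPairAt '/' '*' cs i).mpr hpair) |> fun h => (hmin i hilen) ((pvPairAt _ _ _ _).mpr hpair)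
      by_cases he : 0 ≤ PySem.Chars.findFrom cs ['*', '/'] (PySem.Chars.find cs ['/', '*'] + 2)
      · simp only [he, if_true]
        have hne : PySem.Chars.findFrom cs ['*', '/'] ((K + 2 : Nat) : Int) ≠ -1 := by
          rw [← hcast]; omega
        obtain ⟨hKE, hEpre, hEmin⟩ := PySem.Chars.findFrom_natCast_spec cs ['*', '/'] (K+2) hKlen2 hne
        rw [← hcast] at hKE
        set E := (PySem.Chars.findFrom cs ['*', '/'] (PySem.Chars.find cs ['/', '*'] + 2)).toNat with hE
        have heE : PySem.Chars.findFrom cs ['*', '/'] (PySem.Chars.find cs ['/', '*'] + 2) = (E : Int) :=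
          (Int.toNat_of_nonneg he).symm
        rw [← hcast, heE] at hEpre hEmin
        have hKE' : K + 2 ≤ E := by omega
        have hEpair : cs[E]? = some '*' ∧ cs[E+1]? = some '/' := by
          have : Int.toNat (E : Int) = E := by omega
          rw [this] at hEpre
          exact (pvPairAt _ _ _ _).mp hEpre
        have hElen : E + 1 < cs.length := (List.getElem?_eq_some_iff.mp hEpair.2).1
        -- the slices A takes
        have hsl1 : PySem.Chars.slice cs none (some (PySem.Chars.find cs ['/', '*'])) = cs.take K := by
          simp only [PySem.Chars.slice_eq_listSlice]; rw [PySem.List.slice_to cs hk0]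
        have hsl2 : PySem.Chars.slice cs
            (some (PySem.Chars.findFrom cs ['*', '/'] (PySem.Chars.find cs ['/', '*'] + 2) + 2)) none
            = cs.drop (E + 2) := by
          simp only [PySem.Chars.slice_eq_listSlice]
          rw [PySem.List.slice_from cs (by omega : (0:Int) ≤ PySem.Chars.findFrom cs ['*', '/'] (PySem.Chars.find cs ['/', '*'] + 2) + 2)]
          congr 1
          rw [heE]; omega
        rw [hsl1, hsl2]
        -- the recursive call is on a list shorter by ≥ 3
        have hlen' : (cs.take K ++ [' '] ++ cs.drop (E + 2)).length < n := by
          simp only [List.length_append, List.length_take, List.length_cons, List.length_nil, List.length_drop]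
          omega
        rw [ih _ hlen']
        -- index facts for the rebuilt line
        have hgetlt : ∀ i, i < K → (cs.take K ++ [' '] ++ cs.drop (E + 2))[i]? = cs[i]? := by
          intro i hi
          rw [List.append_assoc, List.getElem?_append]
          simp only [List.length_take]
          rw [if_pos (by omega), List.getElem?_take, if_pos hi]
        have hgetK : (cs.take K ++ [' '] ++ cs.drop (E + 2))[K]? = some ' ' := by
          rw [List.append_assoc, List.getElem?_append]
          simp only [List.length_take]
          rw [if_neg (by omega)]
          have : K - min K cs.length = 0 := by omega
          rw [this]
          rfl
        -- scan of the rebuilt line: the prefix `take K ++ ' '` is copied verbatim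
        have hscancs' : pvScanB (cs.take K ++ [' '] ++ cs.drop (E + 2)) false false
            = ((cs.take K ++ [' ']) ++ (pvScanB (cs.drop (E+2)) false false).1,
                (pvScanB (cs.drop (E+2)) false false).2) := by
          rw [pvScanB_false_copy (cs.take K ++ [' ']) (cs.drop (E+2)) false ?hyp]
          case hyp =>
            intro i hi hpair
            have hiK : i ≤ K := by
              simp only [List.length_append, List.length_take, List.length_cons, List.length_nil] at hi
              omega
            rcases Nat.lt_or_ge i K with hlt | hge
            · rcases Nat.lt_or_ge (i+1) K with hlt1 | hge1
              · -- both indices inside take K: a "/*" before the first one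
                rw [List.append_assoc] at hpair
                rw [← List.append_assoc] at hpair
                have p1 : cs[i]? = some '/' := by rw [← hgetlt i hlt]; exact hpair.1
                have p2 : cs[i+1]? = some '*' := by rw [← hgetlt (i+1) hlt1]; exact hpair.2
                exact hmin i hlt ((pvPairAt _ _ _ _).mpr ⟨p1, p2⟩)
              · -- second char is the inserted space
                have hi1 : i + 1 = K := by omega
                have : (cs.take K ++ [' '] ++ cs.drop (E + 2))[i+1]? = some ' ' := by rw [hi1]; exact hgetK
                rw [List.append_assoc, ← List.append_assoc] at hpair
                rw [this] at hpair
                simp at hpair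
            · -- first char is the inserted space
              have hiK' : i = K := by omega
              have : (cs.take K ++ [' '] ++ cs.drop (E + 2))[i]? = some ' ' := by rw [hiK']; exact hgetK
              rw [List.append_assoc, ← List.append_assoc] at hpair
              rw [this] at hpair
              simp at hpair
        rw [hscancs']
        -- the scan of cs itself: copy `take K`, open at K, close at E
        rw [hscan]
        -- decompose the in-block tail at its first "*/"
        have hv'len : E - (K+2) + (K+2) = E := by omega
        have hv'pair : (cs.drop (K+2))[E-(K+2)]? = some '*' ∧ (cs.drop (K+2))[E-(K+2)+1]? = some '/' := by
          constructor
          · rw [List.getElem?_drop]; rw [(by omega : K + 2 + (E - (K+2)) = E)]; exact hEpair.1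
          · rw [List.getElem?_drop]; rw [(by omega : K + 2 + (E - (K+2) + 1) = E + 1)]; exact hEpair.2
        have hsplit2 : cs.drop (K+2) = (cs.drop (K+2)).take (E-(K+2)) ++ '*' :: '/' :: cs.drop (E+2) := by
          have h := pvSplitPair (cs.drop (K+2)) (E-(K+2)) '*' '/' hv'pair.1 hv'pair.2
          rw [List.drop_drop] at h
          rw [(by omega : K + 2 + (E - (K+2) + 2) = E + 2)] at h
          exact h
        have hclose : pvScanB (cs.drop (K+2)) true true
            = ((if true then [' '] else []) ++ (pvScanB (cs.drop (E+2)) false true).1,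
                (pvScanB (cs.drop (E+2)) false true).2) := by
          conv_lhs => rw [hsplit2]
          rw [pvScanB_true_close _ _ _ ?hyp2]
          case hyp2 =>
            intro i hi hpair
            rw [← hsplit2] at hpair
            have hij : i < E - (K+2) := by
              calc i < ((cs.drop (K+2)).take (E-(K+2))).length := hi
                _ ≤ E - (K+2) := by simpa using List.length_take_le _ _
            have p1 : cs[K+2+i]? = some '*' := by rw [← List.getElem?_drop]; exact hpair.1
            have p2 : cs[K+2+i+1]? = some '/' := by
              rw [(by omega : K+2+i+1 = K+2+(i+1)), ← List.getElem?_drop]; exact hpair.2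
            have : Int.toNat (E : Int) = E := by omega
            rw [this] at hEmin
            exact hEmin (K+2+i) (by omega) (by omega) ((pvPairAt _ _ _ _).mpr ⟨p1, p2⟩)
        rw [hclose]
        -- the tail scan does not depend on opened_here
        obtain ⟨hq1, hq2⟩ := pvScanB_false_oh (cs.drop (E+2)) true false
        simp only [if_true]
        rw [hq1, hq2]
        simp
      · simp only [he, if_false]
        -- e must be -1: otherwise the spec forces e ≥ K+2 ≥ 0
        have hne : PySem.Chars.findFrom cs ['*', '/'] (PySem.Chars.find cs ['/', '*'] + 2) = -1 := by
          by_contra hne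
          rw [hcast] at hne
          have := (PySem.Chars.findFrom_natCast_spec cs ['*', '/'] (K+2) hKlen2 hne).1
          rw [← hcast] at this
          omega
        rw [hcast] at hne
        have hnoinf : ¬ ['*', '/'] <:+: cs.drop (K + 2) :=
          (PySem.Chars.findFrom_natCast_eq_neg_one_iff cs ['*', '/'] (K+2) hKlen2).mp hne
        have hnocc : ∀ j, ¬ ((cs.drop (K+2))[j]? = some '*' ∧ (cs.drop (K+2))[j+1]? = some '/') :=
          pvNoInfix _ _ _ hnoinf
        rw [hscan, pvScanB_true_noclose _ _ hnocc]
        simp only [PySem.Chars.slice_eq_listSlice, PySem.List.slice_to cs hk0]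
        rw [hkK]
        simp
    · simp only [hin, if_false]
      have hnoinf : ¬ ['/', '*'] <:+: cs := fun h => hin ((PySem.Chars.isIn_iff_infix _ _).mpr h)
      rw [pvScanB_false_nopen _ _ (pvNoInfix _ _ _ hnoinf)]
      simp


lemma pvPhase1Step_eq (i : Int) (inb : Bool) (cl : List (Int × List Char)) (cs : List Char) :
    pvPhase1Step (i, inb, cl) cs =
      (i + 1, (pvScanB cs inb false).2.1,
        if (pvScanB cs inb false).2.1 && !(pvScanB cs inb false).2.2 then cl
        else cl ++ [(i, (pvScanB cs inb false).1)]) := by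
  cases inb with
  | false =>
    simp only [pvPhase1Step, Bool.false_eq_true, if_false]
    rw [pvBlockLoopA_eq_scan (cs.length + 1) cs (by omega)]
    rcases hb : (pvScanB cs false false).2.1 with _ | _
    · simp [hb]
    · have := pvScanB_false_opened cs false hb
      simp [hb, this]
  | true =>
    simp only [pvPhase1Step, if_true]
    by_cases he : 0 ≤ PySem.Chars.find cs ['*', '/']
    · simp only [he, if_true]
      obtain ⟨hpre, hmin⟩ := PySem.Chars.find_spec he
      set K := (PySem.Chars.find cs ['*', '/']).toNat with hK
      have hKpair : cs[K]? = some '*' ∧ cs[K+1]? = some '/' := (pvPairAt _ _ _ _).mp hpre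
      have hsplit : cs = cs.take K ++ '*' :: '/' :: cs.drop (K + 2) :=
        pvSplitPair _ _ _ _ hKpair.1 hKpair.2
      have hscan : pvScanB cs true false
          = ((pvScanB (cs.drop (K+2)) false false).1, (pvScanB (cs.drop (K+2)) false false).2) := by
        conv_lhs => rw [hsplit]
        rw [pvScanB_true_close _ _ _ ?hyp]
        · simp
        case hyp =>
          intro j hj hpair
          rw [← hsplit] at hpair
          have hjK : j < K := by
            calc j < (cs.take K).length := hj
              _ ≤ K := by simpa using List.length_take_le _ _
          exact hmin j hjK ((pvPairAt _ _ _ _).mpr hpair)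
      have hsl : PySem.Chars.slice cs (some (PySem.Chars.find cs ['*', '/'] + 2)) none = cs.drop (K+2) := by
        simp only [PySem.Chars.slice_eq_listSlice]
        rw [PySem.List.slice_from cs (by omega : (0:Int) ≤ PySem.Chars.find cs ['*', '/'] + 2)]
        congr 1
        omega
      rw [hsl, pvBlockLoopA_eq_scan _ _ (by omega), hscan]
      rcases hb : (pvScanB (cs.drop (K+2)) false false).2.1 with _ | _
      · simp [hb]
      · have := pvScanB_false_opened (cs.drop (K+2)) false hb
        simp [hb, this]
    · simp only [he, if_false]
      have hne : PySem.Chars.find cs ['*', '/'] = -1 := by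
        have := PySem.Chars.neg_one_le_find cs ['*', '/']
        omega
      have hnoinf : ¬ ['*', '/'] <:+: cs := (PySem.Chars.find_eq_neg_one_iff _ _).mp hne
      rw [pvScanB_true_noclose _ _ (pvNoInfix _ _ _ hnoinf)]
      simp





lemma pvStepB_eq (i : Int) (inb : Bool) (acc : List Char) (sl : Int)
    (m : List (Int × List Char)) (cs : List Char) :
    pvStepB (i, inb, acc, sl, m) cs =
      if (pvScanB cs inb false).2.1 && !(pvScanB cs inb false).2.2 then
        (i + 1, (pvScanB cs inb false).2.1, acc, sl, m)
      else
        (i + 1, (pvScanB cs inb false).2.1,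
          (pvPhase2Step (m, acc, sl) (i, (pvScanB cs inb false).1)).2.1,
          (pvPhase2Step (m, acc, sl) (i, (pvScanB cs inb false).1)).2.2,
          (pvPhase2Step (m, acc, sl) (i, (pvScanB cs inb false).1)).1) := by
  simp only [pvStepB, pvPhase2Step]
  split_ifs <;> rfl

lemma pvPhase1_out_append : ∀ (lines : List (List Char)) (i : Int) (inb : Bool) (cl : List (Int × List Char)),
    lines.foldl pvPhase1Step (i, inb, cl) =
      ((lines.foldl pvPhase1Step (i, inb, [])).1,
        (lines.foldl pvPhase1Step (i, inb, [])).2.1,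
        cl ++ (lines.foldl pvPhase1Step (i, inb, [])).2.2) := by
  intro lines
  induction lines with
  | nil => intro i inb cl; simp
  | cons c rest ih =>
    intro i inb cl
    simp only [List.foldl_cons]
    rw [pvPhase1Step_eq i inb cl c, pvPhase1Step_eq i inb [] c]
    split
    · rw [ih]
    · rw [ih (i+1) _ (cl ++ [(i, (pvScanB c inb false).1)])]
      conv_rhs => rw [ih (i+1) _ ([] ++ [(i, (pvScanB c inb false).1)])]
      simp

lemma pvFusion : ∀ (lines : List (List Char)) (i : Int) (inb : Bool)
    (m : List (Int × List Char)) (acc : List Char) (sl : Int),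
    ((lines.foldl pvPhase1Step (i, inb, [])).2.2).foldl pvPhase2Step (m, acc, sl)
      = ((lines.foldl pvStepB (i, inb, acc, sl, m)).2.2.2.2,
          (lines.foldl pvStepB (i, inb, acc, sl, m)).2.2.1,
          (lines.foldl pvStepB (i, inb, acc, sl, m)).2.2.2.1) := by
  intro lines
  induction lines with
  | nil => intro i inb m acc sl; simp
  | cons c rest ih =>
    intro i inb m acc sl
    simp only [List.foldl_cons]
    rw [pvPhase1Step_eq i inb [] c, pvStepB_eq i inb acc sl m c]
    split
    · rw [pvPhase1_out_append]
      simp only [List.nil_append]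
      exact ih (i+1) _ m acc sl
    · rw [pvPhase1_out_append]
      simp only [List.nil_append, List.foldl_append, List.foldl_cons, List.foldl_nil]
      rw [ih (i+1) _ _ _ _]


-- ===== VERDICT (by name: the statement is the Claim_ definition above) =====
theorem preprocess_do_py_spec : Claim_equal_preprocess_do_py := by
  intro text _
  unfold Spec_preprocess_do_py
  simp only [preprocess_do_py, preprocess_do_py_alt]
  rw [pvFusion]
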